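-- pv_equiv track=rewrite | github.com/meriliis/advent-of-code-2019 | day6/task1.py | get_all_orbits
-- ===== SOURCE A (Python) =====
-- from typing import List, Tuple
--
-- def convert_orbit_map_to_dict(orbit_map: List[str]) -> dict:
--     orbit_map_dict = {}
--
--     for orbit in orbit_map:
--         orbitee, orbiter = tuple(orbit.split(')'))
--         orbit_map_dict[orbiter] = orbitee
--
--     return orbit_map_dict
--
-- def get_all_orbits(orbit_map: dict) -> int:
--     all_orbits = {}
--
--     orbit_dict = convert_orbit_map_to_dict(orbit_map)
--
--     for orbiter, orbitee in orbit_dict.items():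
--         all_orbits[orbiter] = {orbitee}
--
--         while True:
--             orbitee = orbit_dict.get(orbitee, None)
--
--             if not orbitee:
--                 break
--
--             all_orbits[orbiter].add(orbitee)
--
--     return all_orbits
-- ===== SOURCE B (Python) =====
-- def get_all_orbits(orbit_map):
--     parent = dict(reversed(line.split(')')) for line in orbit_map)
--     chain = {}  # node -> list of all ancestors reachable strictly above node
--
--     def compute(start):
--         path = []
--         node = start
--         while node not in chain:
--             q = parent.get(node)
--             if not q:
--                 chain[node] = []
--                 break
--             path.append(node)
--             node = q
--         for n in reversed(path):
--             chain[n] = [parent[n]] + chain[parent[n]]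
--         return chain[start]
--
--     return {k: {p} | set(compute(p)) for k, p in parent.items()}
-- ===== Notes on version B (the rewrite author's own statement) =====
-- stated objective: faster
-- what changed: B memoizes: instead of re-walking the whole parent chain from scratch for every key as A does, B walks up only until it hits an already-computed node and caches each node's full ancestor list, so every edge is traversed O(1) times.
import Mathlib
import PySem

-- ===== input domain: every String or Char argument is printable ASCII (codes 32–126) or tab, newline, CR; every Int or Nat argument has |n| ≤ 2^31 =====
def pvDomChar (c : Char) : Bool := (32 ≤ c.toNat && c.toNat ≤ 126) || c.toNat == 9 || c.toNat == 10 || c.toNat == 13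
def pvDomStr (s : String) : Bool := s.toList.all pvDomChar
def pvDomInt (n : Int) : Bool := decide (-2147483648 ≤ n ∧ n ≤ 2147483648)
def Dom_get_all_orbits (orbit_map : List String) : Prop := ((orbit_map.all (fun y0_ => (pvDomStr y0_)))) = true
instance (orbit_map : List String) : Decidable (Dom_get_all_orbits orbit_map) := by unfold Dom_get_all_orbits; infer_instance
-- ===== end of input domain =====

-- B replaces A's per-key re-walk of the whole parent chain by a memoized chain computation
-- (each node's ancestor list is computed once and cached); equivalence is about the RETURN value.

-- ===== PORT A =====
-- convert_orbit_map_to_dict: orbiter -> orbitee ('tuple unpack' raises unless split gives 2 parts; Pre_ excludes that)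
def pvConvA (orbit_map : List String) : PySem.Dict String String :=
  orbit_map.foldl (fun d orbit =>
    match PySem.Str.split? orbit ")" with
    | some [orbitee, orbiter] => d.insert orbiter orbitee
    | _ => d) PySem.Dict.empty

-- A's inner 'while True' loop (fueled: the Python loop is unbounded; Pre_ guarantees it
-- terminates within items.length+1 steps, where the fuel is never exhausted)
def pvLoopA (d : PySem.Dict String String) : Nat → String → PySem.Set String → PySem.Set String
  | 0, _, acc => acc
  | f+1, orbitee, acc =>
    match d.get? orbitee with
    | none => acc
    | some t => if t = "" then acc else pvLoopA d f t (PySem.Set.add acc t)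

def get_all_orbits (orbit_map : List String) : List (String × List String) :=
  let d := pvConvA orbit_map
  (d.items.foldl (fun acc kv =>
      acc.insert kv.1 (pvLoopA d (d.items.length + 1) kv.2 (PySem.Set.ofList [kv.2])))
    (PySem.Dict.empty : PySem.Dict String (PySem.Set String))).items

-- ===== PORT B =====
-- parent = dict(reversed(line.split(')')) for line in orbit_map)
def pvConvB (orbit_map : List String) : PySem.Dict String String :=
  orbit_map.foldl (fun d line =>
    match (PySem.Str.split? line ")").getD [] |>.reverse with
    | [orbiter, orbitee] => d.insert orbiter orbitee
    | _ => d) PySem.Dict.empty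

-- compute's 'while node not in chain' loop: walk up until a cached node or a terminator,
-- collecting the path (fueled like A's loop; under Pre_ the fuel is never exhausted)
def pvDescend (par : PySem.Dict String String) :
    Nat → String → List String → PySem.Dict String (List String) →
    (List String × PySem.Dict String (List String))
  | 0, _, path, ch => (path, ch)
  | f+1, node, path, ch =>
    match ch.get? node with
    | some _ => (path, ch)
    | none =>
      match par.get? node with
      | none => (path, ch.insert node [])
      | some q => if q = "" then (path, ch.insert node []) else pvDescend par f q (path ++ [node]) ch

-- compute's unwind: 'for n in reversed(path): chain[n] = [parent[n]] + chain[parent[n]]'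
-- (parent[n] and chain[parent[n]] always exist for path nodes; getD is exact there)
def pvUnwind (par : PySem.Dict String String) (ch : PySem.Dict String (List String))
    (revpath : List String) : PySem.Dict String (List String) :=
  revpath.foldl (fun c n =>
    let q := par.getD n ""
    c.insert n (q :: c.getD q [])) ch

def pvCompute (par : PySem.Dict String String) (fuel : Nat) (start : String)
    (ch : PySem.Dict String (List String)) : List String × PySem.Dict String (List String) :=
  let r := pvDescend par fuel start [] ch
  let ch2 := pvUnwind par r.2 r.1.reverse
  (ch2.getD start [], ch2)

def get_all_orbits_alt (orbit_map : List String) : List (String × List String) :=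
  let par := pvConvB orbit_map
  ((par.items.foldl (fun st kv =>
      let r := pvCompute par (par.items.length + 1) kv.2 st.2
      (st.1.insert kv.1 (PySem.Set.update (PySem.Set.ofList [kv.2]) r.1), r.2))
    ((PySem.Dict.empty : PySem.Dict String (PySem.Set String)),
     (PySem.Dict.empty : PySem.Dict String (List String)))).1).items

-- ===== PRECONDITION & SPEC =====
-- one step of the ancestor walk: the next orbitee, none where the Python loop breaks (missing key or falsy "")
def pvStep (d : PySem.Dict String String) (s : String) : Option String :=
  match d.get? s with
  | none => none
  | some t => if t = "" then none else some t

-- 'the walk from s reaches a terminator within f steps' (acyclicity of the parent relation)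
def pvTerm (d : PySem.Dict String String) : Nat → String → Bool
  | 0, _ => false
  | f+1, s =>
    match pvStep d s with
    | none => true
    | some t => pvTerm d f t

-- Pre_ holds exactly where the Python A returns: every line splits on ')' into exactly two parts
-- (otherwise tuple unpacking raises ValueError) and every parent chain terminates
-- (on a cyclic map A's 'while True' loop never returns); items.length+1 steps are always
-- enough for a terminating chain, whose nodes are distinct keys of the dict.
def Pre_get_all_orbits (orbit_map : List String) : Prop :=
  (∀ line ∈ orbit_map, ((PySem.Str.split? line ")").getD []).length = 2) ∧
  (∀ kv ∈ (pvConvA orbit_map).items,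
    pvTerm (pvConvA orbit_map) ((pvConvA orbit_map).items.length + 1) kv.2 = true)
instance (orbit_map : List String) : Decidable (Pre_get_all_orbits orbit_map) := by
  unfold Pre_get_all_orbits; infer_instance

def pvWitness_get_all_orbits : List String := ["COM)A", "A)B", "B)C"]

def Spec_get_all_orbits (orbit_map : List String) (out : List (String × List String)) : Prop := out = get_all_orbits_alt orbit_map
instance (orbit_map : List String) (out : List (String × List String)) : Decidable (Spec_get_all_orbits orbit_map out) := by unfold Spec_get_all_orbits; infer_instance

-- ===== CLAIM (what is proved, stated in full; the proofs are below) =====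
def Claim_equal_get_all_orbits : Prop := ∀ (orbit_map : List String), Dom_get_all_orbits orbit_map → Pre_get_all_orbits orbit_map → Spec_get_all_orbits orbit_map (get_all_orbits orbit_map)

-- ===== LEMMAS AND PROOFS =====

-- the full ancestor chain above s, fueled
def pvChain (d : PySem.Dict String String) : Nat → String → List String
  | 0, _ => []
  | f+1, s =>
    match pvStep d s with
    | none => []
    | some t => t :: pvChain d f t

theorem pvTerm_mono (d : PySem.Dict String String) :
    ∀ f g s, pvTerm d f s = true → f ≤ g → pvTerm d g s = true := by
  
  intro f
  induction f with
  | zero => intro g s h; simp [pvTerm] at h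
  | succ f ih =>
    intro g s h hle
    obtain ⟨g', rfl⟩ : ∃ g', g = g' + 1 := ⟨g - 1, by omega⟩
    simp only [pvTerm] at h ⊢
    cases hstep : pvStep d s with
    | none => rfl
    | some t => simp only [hstep] at h ⊢; exact ih g' t h (by omega)

theorem pvChain_eq_of_term (d : PySem.Dict String String) :
    ∀ f g s, pvTerm d f s = true → f ≤ g → pvChain d g s = pvChain d f s := by
  
  intro f
  induction f with
  | zero => intro g s h; simp [pvTerm] at h
  | succ f ih =>
    intro g s h hle
    obtain ⟨g', rfl⟩ : ∃ g', g = g' + 1 := ⟨g - 1, by omega⟩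
    simp only [pvTerm] at h
    cases hstep : pvStep d s with
    | none => simp [pvChain, hstep]
    | some t =>
      simp only [hstep] at h
      simp [pvChain, hstep, ih g' t h (by omega)]

theorem pvLoopA_eq (d : PySem.Dict String String) :
    ∀ f s acc, pvLoopA d f s acc = (pvChain d f s).foldl PySem.Set.add acc := by
  
  intro f
  induction f with
  | zero => intro s acc; simp [pvLoopA, pvChain]
  | succ f ih =>
    intro s acc
    simp only [pvLoopA, pvChain, pvStep]
    cases hget : d.get? s with
    | none => simp
    | some t =>
      by_cases ht : t = "" <;> simp [ht, ih]

theorem pvConvB_eq (orbit_map : List String) : pvConvB orbit_map = pvConvA orbit_map := by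
  
  unfold pvConvA pvConvB
  congr 1
  funext d line
  rcases h : PySem.Str.split? line ")" with _ | l
  · simp
  · rcases l with _ | ⟨a, _ | ⟨b, _ | ⟨c, t⟩⟩⟩ <;> simp only [Option.getD_some, List.reverse_cons, List.reverse_nil, List.nil_append, List.cons_append, List.append_assoc]
    rcases hr : (t.reverse ++ [c, b, a] : List String) with _ | ⟨x, _ | ⟨y, _ | _⟩⟩ <;>
      first
        | rfl
        | (exfalso; have := congrArg List.length hr; simp at this)

-- every cached entry is the true (fully fueled) chain of its node
def pvGood (d : PySem.Dict String String) (F : Nat) (ch : PySem.Dict String (List String)) : Prop :=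
  ∀ x l, ch.get? x = some l → pvTerm d F x = true ∧ l = pvChain d F x

theorem pvDescend_path (par : PySem.Dict String String) :
    ∀ f node path ch, pvDescend par f node path ch =
      (path ++ (pvDescend par f node [] ch).1, (pvDescend par f node [] ch).2) := by
  
  intro f
  induction f with
  | zero => intro node path ch; simp [pvDescend]
  | succ f ih =>
    intro node path ch
    simp only [pvDescend]
    cases hc : ch.get? node with
    | some l => simp
    | none =>
      cases hp : par.get? node with
      | none => simp
      | some q =>
        by_cases hq : q = ""
        · simp [hq]
        · simp only [hq, if_false]
          rw [ih q (path ++ [node]) ch, ih q ([] ++ [node]) ch]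
          simp

theorem pvCompute_good (d : PySem.Dict String String) (F : Nat) :
    ∀ f node ch, pvGood d F ch → pvTerm d f node = true → f ≤ F →
      pvGood d F (pvCompute d f node ch).2 ∧
      (pvCompute d f node ch).1 = pvChain d F node := by
  intro f
  induction f with
  | zero => intro node ch _ hT; simp [pvTerm] at hT
  | succ f ih =>
    intro node ch hG hT hle
    obtain ⟨F', rfl⟩ : ∃ F', F = F' + 1 := ⟨F - 1, by omega⟩
    cases hc : ch.get? node with
    | some l =>
      have hdes : pvDescend d (f + 1) node [] ch = ([], ch) := by
        simp [pvDescend, hc]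
      refine ⟨by simpa [pvCompute, hdes, pvUnwind] using hG, ?_⟩
      simp only [pvCompute, hdes, pvUnwind, List.reverse_nil, List.foldl_nil]
      rw [PySem.Dict.getD_eq_get?_getD, hc]
      exact (hG node l hc).2
    | none =>
      have hterm : ∀ hs : pvStep d node = none,
          pvGood d (F' + 1) (pvCompute d (f + 1) node ch).2 ∧
          (pvCompute d (f + 1) node ch).1 = pvChain d (F' + 1) node := by
        intro hs
        have hdes : pvDescend d (f + 1) node [] ch = ([], ch.insert node []) := by
          unfold pvStep at hs
          simp only [pvDescend, hc]
          cases hp : d.get? node with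
          | none => rfl
          | some q =>
            rw [hp] at hs
            by_cases hq : q = ""
            · simp [hq]
            · simp [hq] at hs
        have hchn : pvChain d (F' + 1) node = [] := by simp [pvChain, hs]
        have htn : pvTerm d (F' + 1) node = true := by simp [pvTerm, hs]
        constructor
        · intro x l hx
          simp only [pvCompute, hdes, pvUnwind, List.reverse_nil, List.foldl_nil] at hx
          rw [PySem.Dict.get?_insert] at hx
          by_cases hxn : x = node
          · rw [if_pos hxn, Option.some.injEq] at hx
            subst hxn
            exact ⟨htn, by rw [← hx, hchn]⟩
          · rw [if_neg hxn] at hx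
            exact hG x l hx
        · simp only [pvCompute, hdes, pvUnwind, List.reverse_nil, List.foldl_nil]
          rw [PySem.Dict.getD_eq_get?_getD, PySem.Dict.get?_insert_self, hchn]
          rfl
      cases hs : pvStep d node with
      | none => exact hterm hs
      | some q =>
        have hp : d.get? node = some q ∧ q ≠ "" := by
          unfold pvStep at hs
          cases hp' : d.get? node with
          | none => rw [hp'] at hs; simp at hs
          | some t =>
            rw [hp'] at hs
            by_cases ht : t = ""
            · simp [ht] at hs
            · simp [ht] at hs
              exact ⟨by rw [hs], hs ▸ ht⟩
        have hdes : pvDescend d (f + 1) node [] ch =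
            ([node] ++ (pvDescend d f q [] ch).1, (pvDescend d f q [] ch).2) := by
          simp only [pvDescend, hc, hp.1, List.nil_append]
          rw [if_neg hp.2, pvDescend_path d f q [node] ch]
        have hTq : pvTerm d f q = true := by
          simp only [pvTerm, hs] at hT; exact hT
        have hIH := ih q ch hG hTq (by omega)
        simp only [pvCompute] at hIH
        have hgd : d.getD node "" = q := by
          rw [PySem.Dict.getD_eq_get?_getD, hp.1]; rfl
        have hred : (pvCompute d (f + 1) node ch).2 =
            ((pvCompute d f q ch).2).insert node (q :: ((pvCompute d f q ch).2).getD q []) := by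
          simp only [pvCompute, hdes, List.cons_append, List.nil_append, List.reverse_cons,
            pvUnwind, List.foldl_append, List.foldl_cons, List.foldl_nil, hgd]
        have hentry : (q :: ((pvCompute d f q ch).2).getD q []) = pvChain d (F' + 1) node := by
          simp only [pvCompute] at *
          rw [hIH.2]
          have h1 : pvChain d (F' + 1) node = q :: pvChain d F' q := by
            simp [pvChain, hs]
          rw [h1, pvChain_eq_of_term d f F' q hTq (by omega),
            pvChain_eq_of_term d f (F' + 1) q hTq (by omega)]
        constructor
        · intro x l hx
          rw [hred, PySem.Dict.get?_insert] at hx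
          by_cases hxn : x = node
          · rw [if_pos hxn, Option.some.injEq] at hx
            subst hxn
            exact ⟨pvTerm_mono d (f + 1) (F' + 1) x hT (by omega), by rw [← hx, hentry]⟩
          · rw [if_neg hxn] at hx
            exact hIH.1 x l hx
        · have : (pvCompute d (f + 1) node ch).1 =
              ((pvCompute d (f + 1) node ch).2).getD node [] := by
            simp only [pvCompute]
          rw [this, hred, PySem.Dict.getD_eq_get?_getD, PySem.Dict.get?_insert_self, hentry]
          rfl

theorem pvMain (d : PySem.Dict String String) (F : Nat) :
    ∀ (l : List (String × String)) (accA : PySem.Dict String (PySem.Set String)) ch,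
      pvGood d F ch → (∀ kv ∈ l, pvTerm d F kv.2 = true) →
      l.foldl (fun acc kv => acc.insert kv.1 (pvLoopA d F kv.2 (PySem.Set.ofList [kv.2]))) accA =
      (l.foldl (fun st kv =>
          let r := pvCompute d F kv.2 st.2
          (st.1.insert kv.1 (PySem.Set.update (PySem.Set.ofList [kv.2]) r.1), r.2)) (accA, ch)).1 := by
  intro l
  induction l with
  | nil => intro accA ch _ _; simp
  | cons kv rest ih =>
    intro accA ch hG hall
    simp only [List.foldl_cons]
    have hcg := pvCompute_good d F F kv.2 ch hG (hall kv (by simp)) (le_refl F)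
    have hval : pvLoopA d F kv.2 (PySem.Set.ofList [kv.2]) =
        PySem.Set.update (PySem.Set.ofList [kv.2]) (pvCompute d F kv.2 ch).1 := by
      rw [pvLoopA_eq, hcg.2]
      simp [PySem.Set.update]
    rw [hval]
    exact ih _ _ hcg.1 (fun p hp => hall p (by simp [hp]))

-- ===== VERDICT (by name: the statement is the Claim_ definition above) =====
theorem get_all_orbits_spec : Claim_equal_get_all_orbits := by
  intro om _hDom hPre
  unfold Spec_get_all_orbits get_all_orbits get_all_orbits_alt
  rw [pvConvB_eq]
  exact congrArg PySem.Dict.items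
    (pvMain (pvConvA om) ((pvConvA om).items.length + 1)
      (pvConvA om).items PySem.Dict.empty PySem.Dict.empty
      (fun x l h => by simp [PySem.Dict.get?_empty] at h) hPre.2)
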